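-- pv_equiv track=rewrite | github.com/vttresearch/qc-parallelizer | src/qc_parallelizer/util/layouts.py | adjust_indices
-- ===== SOURCE A (Python) =====
-- def adjust_indices(
--     indices: set[int],
--     blocked: set[int],
-- ) -> tuple[dict[int, int | None], dict[int, int]]:
--     """
--     Small helper for adjusting qubit indices based on a set of blocked qubits. Returns a `dict` of
--     the mapped indices and an inverse mapping.
--
--     This is best explained visually:
--     ```
--     0 [blocked] -> None  ,----> 0
--                         /
--     1 -----------------'  ,---> 1
--                          /
--     2 [blocked] -> None /   ,-> 2
--                        /   /
--     3 ----------------'   /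
--                          /
--     4 ------------------'
--     ```
--     """
--
--     def adjust(index):
--         if index in blocked:
--             return None
--         blocked_below = len({other for other in blocked if other < index})
--         return index - blocked_below
--
--     mapping = {index: adjust(index) for index in indices}
--     return mapping, {b: a for a, b in mapping.items() if b is not None}
-- ===== SOURCE B (Python) =====
-- def adjust_indices(
--     indices: set[int],
--     blocked: set[int],
-- ) -> tuple[dict[int, int | None], dict[int, int]]:
--     # Sort blocked once; for each index, count blocked qubits below it with a
--     # binary search instead of re-scanning the whole blocked set.
--     def _bisect_left(a, x):
--         lo, hi = 0, len(a)
--         while lo < hi: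
--             mid = (lo + hi) // 2
--             if a[mid] < x:
--                 lo = mid + 1
--             else:
--                 hi = mid
--         return lo
--
--     blocked_sorted = sorted(blocked)
--     mapping = {}
--     inverse = {}
--     for index in indices:
--         if index in blocked:
--             mapping[index] = None
--         else:
--             new = index - _bisect_left(blocked_sorted, index)
--             mapping[index] = new
--             inverse[new] = index
--     return mapping, inverse
-- ===== Notes on version B (the rewrite author's own statement) =====
-- stated objective: faster
-- what changed: A rebuilds the set of blocked qubits below each index (a full scan of blocked per index); B sorts blocked once and counts blocked-below with a hand-written binary search, building mapping and inverse in a single pass.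
import Mathlib
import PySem

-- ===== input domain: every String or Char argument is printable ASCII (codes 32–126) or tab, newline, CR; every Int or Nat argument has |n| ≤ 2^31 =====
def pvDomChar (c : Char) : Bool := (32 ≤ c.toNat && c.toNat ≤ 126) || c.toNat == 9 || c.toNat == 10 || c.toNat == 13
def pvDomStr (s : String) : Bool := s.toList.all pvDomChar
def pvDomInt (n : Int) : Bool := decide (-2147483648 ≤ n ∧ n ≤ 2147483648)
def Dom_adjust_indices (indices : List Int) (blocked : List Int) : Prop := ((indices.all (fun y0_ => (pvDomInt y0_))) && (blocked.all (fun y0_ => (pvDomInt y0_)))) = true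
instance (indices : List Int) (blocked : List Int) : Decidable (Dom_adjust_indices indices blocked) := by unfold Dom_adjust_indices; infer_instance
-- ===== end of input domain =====

-- B sorts blocked once and counts blocked qubits below each index by binary search,
-- building mapping and inverse in one pass, instead of rebuilding a filtered set per index.


-- ===== PORT A =====
-- def adjust(index): if index in blocked: None else index - len({other for other in blocked if other < index})
def pvAdjA (blocked : List Int) (index : Int) : Option Int :=
  if blocked.contains index then none
  else some (index - ((PySem.Set.ofList (blocked.filter (fun other => decide (other < index)))).length : Int))

def adjust_indices (indices : List Int) (blocked : List Int) : (List (Int × Option Int)) × (List (Int × Int)) :=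
  -- mapping = {index: adjust(index) for index in indices}
  let mapping : PySem.Dict Int (Option Int) :=
    indices.foldl (fun d index => d.insert index (pvAdjA blocked index)) PySem.Dict.empty
  -- {b: a for a, b in mapping.items() if b is not None}
  let inverse : PySem.Dict Int Int :=
    mapping.items.foldl (fun d p => match p.2 with | some b => d.insert b p.1 | none => d) PySem.Dict.empty
  (mapping.items, inverse.items)

-- ===== PORT B =====
-- hand-written _bisect_left(a, x): while lo < hi: mid = (lo+hi)//2; …
-- (a[mid] is always in range since lo < hi ≤ len a, so List.getD is exact here)
def pvBisectLoop (a : List Int) (x : Int) (lo hi : Nat) : Nat :=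
  if lo < hi then
    let mid := (lo + hi) / 2
    if a.getD mid 0 < x then pvBisectLoop a x (mid + 1) hi else pvBisectLoop a x lo mid
  else lo
termination_by hi - lo
decreasing_by all_goals omega

def adjust_indices_alt (indices : List Int) (blocked : List Int) : (List (Int × Option Int)) × (List (Int × Int)) :=
  let blocked_sorted := PySem.List.sorted blocked (fun x => x) false
  let st :=
    indices.foldl
      (fun (st : PySem.Dict Int (Option Int) × PySem.Dict Int Int) index =>
        if blocked.contains index then (st.1.insert index none, st.2)
        else
          let nw := index - (pvBisectLoop blocked_sorted index 0 blocked_sorted.length : Int)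
          (st.1.insert index (some nw), st.2.insert nw index))
      (PySem.Dict.empty, PySem.Dict.empty)
  (st.1.items, st.2.items)

-- ===== PRECONDITION & SPEC =====
-- Both parameters are Python set[int]; Pre_ excludes duplicate-carrying lists, which are not
-- values of that type (on them A's per-index set comprehension dedups blocked while B's
-- bisect counts multiplicity).
def Pre_adjust_indices (indices : List Int) (blocked : List Int) : Prop :=
  indices.Nodup ∧ blocked.Nodup
instance (indices : List Int) (blocked : List Int) : Decidable (Pre_adjust_indices indices blocked) := by unfold Pre_adjust_indices; infer_instance

def pvWitness_adjust_indices : List Int × List Int := ([0, 1, 3], [0, 2])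

def Spec_adjust_indices (indices : List Int) (blocked : List Int) (out : (List (Int × Option Int)) × (List (Int × Int))) : Prop := out = adjust_indices_alt indices blocked
instance (indices : List Int) (blocked : List Int) (out : (List (Int × Option Int)) × (List (Int × Int))) : Decidable (Spec_adjust_indices indices blocked out) := by unfold Spec_adjust_indices; infer_instance

-- ===== CLAIM (what is proved, stated in full; the proofs are below) =====
def Claim_equal_adjust_indices : Prop := ∀ (indices : List Int) (blocked : List Int), Dom_adjust_indices indices blocked → Pre_adjust_indices indices blocked → Spec_adjust_indices indices blocked (adjust_indices indices blocked)

-- ===== LEMMAS AND PROOFS =====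

-- in a ≤-sorted list, a position whose element is < x bounds countP (· < x) from below
theorem pv_sorted_countP_lower (a : List Int) (x : Int) (m : Nat)
    (hs : a.Pairwise (· ≤ ·)) (hm : m < a.length) (hx : a.getD m 0 < x) :
    m + 1 ≤ a.countP (fun y => decide (y < x)) := by
  have hmono := List.pairwise_iff_getElem.mp hs
  have hsplit : a = a.take (m+1) ++ a.drop (m+1) := (List.take_append_drop _ _).symm
  have hall : ∀ y ∈ a.take (m+1), (fun y => decide (y < x)) y = true := by
    intro y hy
    obtain ⟨i, hi, rfl⟩ := List.mem_iff_getElem.mp hy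
    have hilen : i < m + 1 := by
      have := hi; simp [List.length_take] at this; omega
    have : (a.take (m+1))[i] = a[i]'(by omega) := List.getElem_take ..
    rw [this]
    have hm' : a.getD m 0 = a[m] := List.getD_eq_getElem a 0 hm
    rcases Nat.lt_or_ge i m with h | h
    · have := hmono i m (by omega) hm h
      simp only [decide_eq_true_eq]; omega
    · have : i = m := by omega
      subst this
      simp only [decide_eq_true_eq]; omega
  calc m + 1 = (a.take (m+1)).countP (fun y => decide (y < x)) := by
        rw [List.countP_eq_length.mpr hall, List.length_take]; omega
    _ ≤ _ := by
        conv_rhs => rw [hsplit]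
        rw [List.countP_append]; omega

-- and a position whose element is ≥ x bounds it from above
theorem pv_sorted_countP_upper (a : List Int) (x : Int) (m : Nat)
    (hs : a.Pairwise (· ≤ ·)) (hm : m < a.length) (hx : ¬ a.getD m 0 < x) :
    a.countP (fun y => decide (y < x)) ≤ m := by
  have hmono := List.pairwise_iff_getElem.mp hs
  have hsplit : a = a.take m ++ a.drop m := (List.take_append_drop _ _).symm
  have hzero : (a.drop m).countP (fun y => decide (y < x)) = 0 := by
    rw [List.countP_eq_zero]
    intro y hy
    obtain ⟨i, hi, rfl⟩ := List.mem_iff_getElem.mp hy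
    have hi' : m + i < a.length := by simp [List.length_drop] at hi; omega
    have : (a.drop m)[i] = a[m + i]'hi' := List.getElem_drop ..
    rw [this]
    have hm' : a.getD m 0 = a[m] := List.getD_eq_getElem a 0 hm
    rcases Nat.eq_or_lt_of_le (Nat.le_add_right m i) with h | h
    · simp only [decide_eq_true_eq]
      have : a[m + i]'hi' = a[m] := by congr 1; omega
      omega
    · have := hmono m (m+i) (by omega) hi' h
      simp only [decide_eq_true_eq]; omega
  conv_lhs => rw [hsplit]
  rw [List.countP_append, hzero]
  have := List.countP_le_length (l := a.take m) (p := fun y => decide (y < x))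
  simp [List.length_take] at this ⊢
  omega

-- the binary-search loop converges to countP (· < x) on a sorted list
theorem pv_bisect_aux (a : List Int) (x : Int) (hs : a.Pairwise (· ≤ ·)) :
    ∀ n lo hi, hi - lo ≤ n → hi ≤ a.length →
    lo ≤ a.countP (fun y => decide (y < x)) →
    a.countP (fun y => decide (y < x)) ≤ hi →
    pvBisectLoop a x lo hi = a.countP (fun y => decide (y < x)) := by
  intro n
  induction n with
  | zero =>
    intro lo hi hn hhi h1 h2
    rw [pvBisectLoop]
    have : ¬ lo < hi := by omega
    simp [this]; omega
  | succ n ih =>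
    intro lo hi hn hhi h1 h2
    rw [pvBisectLoop]
    by_cases hlh : lo < hi
    · simp only [hlh, if_true]
      by_cases hmid : a.getD ((lo + hi) / 2) 0 < x
      · simp only [hmid, if_true]
        apply ih
        · omega
        · exact hhi
        · have := pv_sorted_countP_lower a x ((lo + hi) / 2) hs (by omega) hmid
          omega
        · exact h2
      · simp only [hmid, if_false]
        apply ih
        · omega
        · omega
        · exact h1
        · exact pv_sorted_countP_upper a x ((lo + hi) / 2) hs (by omega) hmid
    · simp [hlh]; omega

theorem pv_bisect_spec (a : List Int) (x : Int) (lo hi : Nat)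
    (hs : a.Pairwise (· ≤ ·)) (hhi : hi ≤ a.length)
    (h1 : lo ≤ a.countP (fun y => decide (y < x)))
    (h2 : a.countP (fun y => decide (y < x)) ≤ hi) :
    pvBisectLoop a x lo hi = a.countP (fun y => decide (y < x)) :=
  pv_bisect_aux a x hs (hi - lo) lo hi le_rfl hhi h1 h2

-- per-index agreement: A's filtered-set count equals B's bisect on sorted blocked
theorem pv_adj_eq (blocked : List Int) (hb : blocked.Nodup) (i : Int) :
    pvAdjA blocked i =
      (if blocked.contains i then none
       else some (i - (pvBisectLoop (PySem.List.sorted blocked (fun x => x) false) i 0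
                        (PySem.List.sorted blocked (fun x => x) false).length : Int))) := by
  unfold pvAdjA
  by_cases hc : blocked.contains i
  · simp only [hc, if_true]
  · simp only [hc]
    set bs := PySem.List.sorted blocked (fun x => x) false with hbs
    have hperm : bs.Perm blocked := PySem.List.sorted_perm ..
    have hs : bs.Pairwise (· ≤ ·) := PySem.List.sorted_pairwise ..
    have hcount : pvBisectLoop bs i 0 bs.length = bs.countP (fun y => decide (y < i)) :=
      pv_bisect_spec bs i 0 bs.length hs le_rfl (Nat.zero_le _) (List.countP_le_length)
    have hset : PySem.Set.ofList (blocked.filter (fun other => decide (other < i)))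
        = blocked.filter (fun other => decide (other < i)) :=
      PySem.Set.ofList_eq_self_of_nodup _ (List.Nodup.filter _ hb)
    rw [hset, hcount, hperm.countP_eq, ← List.countP_eq_length_filter]

-- whole-program agreement on nodup (set-typed) inputs
theorem pv_main (indices blocked : List Int) (hi : indices.Nodup) (hb : blocked.Nodup) :
    adjust_indices indices blocked = adjust_indices_alt indices blocked := by
  set bs := PySem.List.sorted blocked (fun x => x) false with hbs
  set g : Int → Option Int := fun i =>
    if blocked.contains i then none
    else some (i - (pvBisectLoop bs i 0 bs.length : Int)) with hg
  have hpair : ∀ (l : List Int) (m : PySem.Dict Int (Option Int)) (inv : PySem.Dict Int Int),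
      l.foldl
        (fun (st : PySem.Dict Int (Option Int) × PySem.Dict Int Int) index =>
          if blocked.contains index then (st.1.insert index none, st.2)
          else
            let nw := index - (pvBisectLoop bs index 0 bs.length : Int)
            (st.1.insert index (some nw), st.2.insert nw index)) (m, inv)
      = (l.foldl (fun d i => d.insert i (g i)) m,
         l.foldl (fun d i => match g i with | some b => d.insert b i | none => d) inv) := by
    intro l
    induction l with
    | nil => intro m inv; rfl
    | cons a t iht =>
      intro m inv
      simp only [List.foldl_cons]
      by_cases hc : blocked.contains a
      · have hga : g a = none := if_pos hc
        rw [if_pos hc, iht, hga]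
      · have hga : g a = some (a - (pvBisectLoop bs a 0 bs.length : Int)) := if_neg hc
        rw [if_neg hc, iht, hga]
  have hB : adjust_indices_alt indices blocked
      = ((indices.foldl (fun d i => d.insert i (g i)) PySem.Dict.empty).items,
         (indices.foldl (fun d i => match g i with | some b => d.insert b i | none => d) PySem.Dict.empty).items) := by
    unfold adjust_indices_alt
    rw [← hbs]
    simp only [hpair]
  have hitems : (indices.foldl (fun d i => d.insert i (g i)) PySem.Dict.empty).items
      = indices.map (fun i => (i, g i)) := by
    have := PySem.Dict.items_foldl_insert_fresh (l := indices) (k := fun a => a) (v := g)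
      (d := PySem.Dict.empty) (by intro a _; simp) (by simpa using hi)
    simpa using this
  have hA : adjust_indices indices blocked
      = ((indices.foldl (fun d i => d.insert i (g i)) PySem.Dict.empty).items,
         (indices.foldl (fun d i => match g i with | some b => d.insert b i | none => d) PySem.Dict.empty).items) := by
    unfold adjust_indices
    have hfun : (fun (d : PySem.Dict Int (Option Int)) index => d.insert index (pvAdjA blocked index))
        = fun d i => d.insert i (g i) := by
      funext d i
      rw [pv_adj_eq blocked hb i, hg, ← hbs]
    rw [hfun]
    simp only [hitems, List.foldl_map]
  rw [hA, hB]

-- ===== VERDICT (by name: the statement is the Claim_ definition above) =====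
theorem adjust_indices_spec : Claim_equal_adjust_indices := by
  intro indices blocked _ hpre
  exact pv_main indices blocked hpre.1 hpre.2
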